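-- pv_equiv track=rewrite | github.com/ljrkkaa/VLTL-Bench | dataset_generators/complex_LTL_dataset_generator.py | _fragment_sequence
-- ===== SOURCE A (Python) =====
-- from typing import Dict, List, Tuple, Callable
--
-- def _fragment_sequence(props: List[str]) -> str:
--     """Generate sequence mode: <> (p1 && <> (p2 && <> p3))"""
--     if not props:
--         return ""
--     if len(props) == 1:
--         return f"finally {props[0]}"
--
--     inner = props[-1]
--     for p in reversed(props[:-1]):
--         inner = f"( {p} and finally {inner} )"
--     return f"finally {inner}"
-- ===== SOURCE B (Python) =====
-- from typing import List
--
-- def _fragment_sequence(props: List[str]) -> str: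
--     """Generate sequence mode: <> (p1 && <> (p2 && <> p3))"""
--     if not props:
--         return ""
--     opens = "".join(f"( {p} and finally " for p in props[:-1])
--     return f"finally {opens}{props[-1]}" + " )" * (len(props) - 1)
-- ===== Notes on version B (the rewrite author's own statement) =====
-- stated objective: faster
-- what changed: Replaces the reversed-accumulator loop that rebuilds the growing nested string each step with a flat one-pass construction: join the opening fragments of props[:-1], append the last prop, then append len-1 closing parentheses at once.
import Mathlib
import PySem

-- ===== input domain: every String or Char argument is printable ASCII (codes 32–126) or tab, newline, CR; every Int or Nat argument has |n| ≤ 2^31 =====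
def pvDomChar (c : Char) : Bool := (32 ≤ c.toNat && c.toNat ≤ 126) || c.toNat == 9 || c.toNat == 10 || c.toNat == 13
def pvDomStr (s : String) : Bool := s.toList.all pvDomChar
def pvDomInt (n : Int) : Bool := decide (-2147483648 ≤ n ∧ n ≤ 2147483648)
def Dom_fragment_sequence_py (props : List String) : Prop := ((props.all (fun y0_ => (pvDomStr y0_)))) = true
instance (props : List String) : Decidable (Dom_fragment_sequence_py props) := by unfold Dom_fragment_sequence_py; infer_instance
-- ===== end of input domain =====

-- B replaces A's reversed-accumulator nesting loop with a flat one-pass join + repeated closers (objective: faster).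


-- ===== PORT A =====
def fragment_sequence_py (props : List String) : String :=
  if props.length = 0 then ""
  else if props.length = 1 then "finally " ++ PySem.List.pyGetD props 0 ""
  else
    -- props[-1]; the default is never read: the guards ensure props is nonempty
    let inner0 := PySem.List.pyGetD props (-1) ""
    -- for p in reversed(props[:-1]): inner = f"( {p} and finally {inner} )"
    let inner := ((PySem.List.slice props none (some (-1))).reverse).foldl
      (fun inner p => "( " ++ p ++ " and finally " ++ inner ++ " )") inner0
    "finally " ++ inner

-- ===== PORT B =====
-- ' )' * n for n ≥ 0; hand port of Python's str*int (exact for a nonnegative count, the only use here)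
def pvStrRepeat (s : String) : Nat → String
  | 0 => ""
  | n + 1 => s ++ pvStrRepeat s n

def fragment_sequence_py_alt (props : List String) : String :=
  if props.length = 0 then ""
  else
    -- opens = "".join(f"( {p} and finally " for p in props[:-1])
    let opens := PySem.Str.join "" ((PySem.List.slice props none (some (-1))).map
        (fun p => "( " ++ p ++ " and finally "))
    -- f"finally {opens}{props[-1]}" + " )" * (len(props) - 1)
    "finally " ++ opens ++ PySem.List.pyGetD props (-1) "" ++
      pvStrRepeat " )" (props.length - 1)

-- ===== PRECONDITION & SPEC =====
def Spec_fragment_sequence_py (props : List String) (out : String) : Prop := out = fragment_sequence_py_alt props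
instance (props : List String) (out : String) : Decidable (Spec_fragment_sequence_py props out) := by unfold Spec_fragment_sequence_py; infer_instance

-- ===== CLAIM (what is proved, stated in full; the proofs are below) =====
def Claim_equal_fragment_sequence_py : Prop := ∀ (props : List String), Dom_fragment_sequence_py props → Spec_fragment_sequence_py props (fragment_sequence_py props)

-- ===== LEMMAS AND PROOFS =====

-- props[:-1] on a nonempty list is dropLast
lemma pv_slice_neg_one (xs : List String) (h : xs ≠ []) :
    PySem.List.slice xs none (some (-1)) = xs.dropLast := by
  have hl : 1 ≤ xs.length := List.length_pos_iff.mpr h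
  simp [PySem.List.slice, PySem.List.clampIdx]
  have h2 : ((xs.length : Int) + -1).toNat = xs.length - 1 := by omega
  rw [h2, if_neg h, ← List.dropLast_eq_take]

-- props[-1] on a nonempty list is getLastD
lemma pv_pyGetD_neg_one (xs : List String) (h : xs ≠ []) :
    PySem.List.pyGetD xs (-1) "" = xs.getLastD "" := by
  have hl : 1 ≤ xs.length := List.length_pos_iff.mpr h
  simp [PySem.List.pyGetD, PySem.List.pyGet?, PySem.List.pyIdx?]
  rw [if_pos (by omega)]
  simp [List.getElem?_eq_getElem (by omega : xs.length - 1 < xs.length),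
        List.getLast?_eq_getElem?]

lemma pv_strRepeat_comm (s : String) (n : Nat) :
    (pvStrRepeat s n).toList ++ s.toList = s.toList ++ (pvStrRepeat s n).toList := by
  induction n with
  | zero => simp [pvStrRepeat]
  | succ k ih =>
    simp only [show pvStrRepeat s (k + 1) = s ++ pvStrRepeat s k from rfl,
      String.toList_append, List.append_assoc, ih]

lemma pv_strRepeat_toList (s : String) (n : Nat) :
    (pvStrRepeat s (n + 1)).toList = (pvStrRepeat s n).toList ++ s.toList := by
  rw [show pvStrRepeat s (n + 1) = s ++ pvStrRepeat s n from rfl, String.toList_append,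
      ← pv_strRepeat_comm]

-- "".join over a cons peels off the head
lemma pv_join_empty_cons (p : List Char) (rest : List (List Char)) :
    PySem.Chars.join [] (p :: rest) = p ++ PySem.Chars.join [] rest := by
  cases rest with
  | nil => simp [PySem.Chars.join_singleton]
  | cons q r => rw [PySem.Chars.join_cons_cons]; simp

-- the nesting fold over ys is: the opening fragments of ys, then the core, then ys.length closers
lemma pv_key (ys : List String) (inner : String) :
    ys.foldr (fun p acc => "( " ++ p ++ " and finally " ++ acc ++ " )") inner
    = PySem.Str.join "" (ys.map (fun p => "( " ++ p ++ " and finally ")) ++ inner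
        ++ pvStrRepeat " )" ys.length := by
  induction ys with
  | nil =>
    rw [← String.toList_inj]
    simp [PySem.Str.toList_join, PySem.Chars.join_nil, pvStrRepeat]
  | cons x t ih =>
    rw [← String.toList_inj]
    have ih' := congrArg String.toList ih
    simp only [String.toList_append] at ih'
    simp only [List.foldr_cons, String.toList_append, ih', List.length_cons,
      pv_strRepeat_toList, List.map_map, List.map_cons, PySem.Str.toList_join]
    rw [show ("" : String).toList = [] from rfl, pv_join_empty_cons]
    simp [List.append_assoc]

-- ===== VERDICT (by name: the statement is the Claim_ definition above) =====
theorem fragment_sequence_py_spec : Claim_equal_fragment_sequence_py := by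
  intro props _
  unfold Spec_fragment_sequence_py fragment_sequence_py fragment_sequence_py_alt
  match props with
  | [] => rfl
  | [x] =>
    rw [← String.toList_inj]
    simp [PySem.List.pyGetD, PySem.List.pyGet?, PySem.List.pyIdx?, PySem.List.slice,
      PySem.List.clampIdx, PySem.Str.toList_join, PySem.Chars.join_nil, pvStrRepeat]
  | x :: y :: t =>
    have hne : (x :: y :: t : List String) ≠ [] := by simp
    simp only [List.length_cons]
    rw [if_neg (by omega), if_neg (by omega), if_neg (by omega)]
    rw [pv_slice_neg_one _ hne, pv_pyGetD_neg_one _ hne, List.foldl_reverse, pv_key]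
    rw [← String.toList_inj]
    have hlen : t.length + 1 + 1 - 1 = (x :: y :: t).dropLast.length := by simp
    rw [hlen]
    simp [List.append_assoc]
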